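-- pv_equiv track=rewrite | github.com/arek-grows/Challenges | Challenge72.py | sum_of_evens
-- ===== SOURCE A (Python) =====
-- from typing import List
--
-- def sum_of_evens(matrix: List[List[int]]) -> int:
--     total = 0
--     oned_matrix = []
--     for m in matrix:
--         oned_matrix += m
--     for num in oned_matrix:
--         if num % 2 == 0:
--             total += num
--     return total  # Put your code here!!!
-- ===== SOURCE B (Python) =====
-- from typing import List
--
-- def _row_evens(row: List[int]) -> int:
--     # branch-free: num % 2 is 0 for even, 1 for odd, so num * (1 - num % 2)
--     # contributes num exactly when num is even
--     if not row:
--         return 0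
--     return row[0] * (1 - row[0] % 2) + _row_evens(row[1:])
--
-- def sum_of_evens(matrix: List[List[int]]) -> int:
--     if not matrix:
--         return 0
--     return _row_evens(matrix[0]) + sum_of_evens(matrix[1:])
-- ===== Notes on version B (the rewrite author's own statement) =====
-- stated objective: alternative
-- what changed: B replaces A's two staged imperative passes (flatten into a list with +=, then branch-and-accumulate) with structural recursion on the matrix and a branch-free arithmetic mask num*(1 - num % 2) instead of the parity test; it trades A's iteration for recursion and carries slicing overhead in CPython.
import Mathlib
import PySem

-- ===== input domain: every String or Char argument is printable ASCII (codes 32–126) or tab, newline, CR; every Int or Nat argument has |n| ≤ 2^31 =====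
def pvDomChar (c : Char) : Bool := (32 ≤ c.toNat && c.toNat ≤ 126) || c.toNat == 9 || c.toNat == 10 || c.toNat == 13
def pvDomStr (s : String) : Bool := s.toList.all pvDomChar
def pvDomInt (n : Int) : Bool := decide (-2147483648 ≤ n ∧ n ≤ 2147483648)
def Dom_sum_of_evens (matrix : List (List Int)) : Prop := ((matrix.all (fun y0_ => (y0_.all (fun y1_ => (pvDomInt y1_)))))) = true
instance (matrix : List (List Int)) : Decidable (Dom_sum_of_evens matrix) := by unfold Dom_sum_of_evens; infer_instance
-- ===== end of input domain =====

-- B replaces A's two staged passes (flatten, then branch-and-accumulate) with structural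
-- recursion on the matrix and a branch-free arithmetic mask num*(1 - num % 2) (objective: alternative).

-- ===== PORT A =====
-- A: flatten into oned_matrix via +=, then accumulate the even entries with a branch
def sum_of_evens (matrix : List (List Int)) : Int :=
  let oned_matrix := matrix.foldl (fun acc m => acc ++ m) []
  oned_matrix.foldl (fun total num => if PySem.Int.mod num 2 == 0 then total + num else total) 0

-- ===== PORT B =====
-- B helper: recursive, branch-free row sum (num % 2 is 0 for even, 1 for odd)
def rowEvens : List Int → Int
  | [] => 0
  | n :: rest => n * (1 - PySem.Int.mod n 2) + rowEvens rest

def sum_of_evens_alt : List (List Int) → Int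
  | [] => 0
  | row :: rest => rowEvens row + sum_of_evens_alt rest

-- ===== PRECONDITION & SPEC =====
def Spec_sum_of_evens (matrix : List (List Int)) (out : Int) : Prop := out = sum_of_evens_alt matrix
instance (matrix : List (List Int)) (out : Int) : Decidable (Spec_sum_of_evens matrix out) := by unfold Spec_sum_of_evens; infer_instance

-- ===== CLAIM (what is proved, stated in full; the proofs are below) =====
def Claim_equal_sum_of_evens : Prop := ∀ (matrix : List (List Int)), Dom_sum_of_evens matrix → Spec_sum_of_evens matrix (sum_of_evens matrix)

-- ===== LEMMAS AND PROOFS =====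

-- A's inner accumulation over one list equals the branch-free recursive sum, shifted by the accumulator.
theorem foldl_evens_eq_rowEvens (l : List Int) (t0 : Int) :
    l.foldl (fun total num => if PySem.Int.mod num 2 == 0 then total + num else total) t0
      = t0 + rowEvens l := by
  induction l generalizing t0 with
  | nil => simp [rowEvens]
  | cons n rest ih =>
    have hm : PySem.Int.mod n 2 = n % 2 := PySem.Int.mod_eq_emod_of_pos (by norm_num)
    simp only [List.foldl, rowEvens, ih, hm]
    rcases Int.emod_two_eq n with h2 | h2 <;> simp [h2] <;> ring

-- flattening then accumulating equals row-by-row accumulation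
theorem flatten_foldl (rows : List (List Int)) (pre : List Int) :
    ((rows.foldl (fun acc m => acc ++ m) pre).foldl
      (fun total num => if PySem.Int.mod num 2 == 0 then total + num else total) 0)
      = rowEvens pre + sum_of_evens_alt rows := by
  induction rows generalizing pre with
  | nil => rw [foldl_evens_eq_rowEvens]; simp [sum_of_evens_alt]
  | cons r rs ih =>
    simp only [List.foldl, sum_of_evens_alt]
    rw [ih (pre ++ r)]
    have : rowEvens (pre ++ r) = rowEvens pre + rowEvens r := by
      induction pre with
      | nil => simp [rowEvens]
      | cons x xs ihp => simp [rowEvens, ihp]; ring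
    rw [this]; ring

-- ===== VERDICT (by name: the statement is the Claim_ definition above) =====
theorem sum_of_evens_spec : Claim_equal_sum_of_evens := by
  intro matrix _
  unfold Spec_sum_of_evens sum_of_evens
  simpa [rowEvens] using flatten_foldl matrix []
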